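-- pv_equiv track=rewrite | github.com/Gatorix/audit-tools | others/g_adjusted_entry.py | insert_blank_line
-- ===== SOURCE A (Python) =====
-- def insert_blank_line(li, x, insert_list):
--     '对二维列表相同行下面插入一个空行，li是需要操作的二维表，x是判断相同行的元素在行中的位置'
--     n_li = []
--     for i in range(1, len(li)):
--
--         n_li.append(li[i-1])
--         if li[i][x] != li[i-1][x]:
--             n_li.append(insert_list)
--     n_li.append(li[-1])
--     return n_li
-- ===== SOURCE B (Python) =====
-- def insert_blank_line(li, x, insert_list):
--     '对二维列表相同行下面插入一个空行，li是需要操作的二维表，x是判断相同行的元素在行中的位置'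
--     # Group consecutive rows whose key cell is equal, then join the groups
--     # with insert_list between consecutive groups.
--     groups = []
--     for row in li:
--         if groups and groups[-1][-1][x] == row[x]:
--             groups[-1].append(row)
--         else:
--             groups.append([row])
--     out = []
--     for g in groups:
--         if out:
--             out.append(insert_list)
--         out.extend(g)
--     return out
-- ===== Notes on version B (the rewrite author's own statement) =====
-- stated objective: alternative
-- what changed: Replaces the index-based adjacent-pair comparison loop with a group-then-join strategy: consecutive rows with equal key cells are collected into groups, and the result is the groups joined with insert_list between them.
import Mathlib
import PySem

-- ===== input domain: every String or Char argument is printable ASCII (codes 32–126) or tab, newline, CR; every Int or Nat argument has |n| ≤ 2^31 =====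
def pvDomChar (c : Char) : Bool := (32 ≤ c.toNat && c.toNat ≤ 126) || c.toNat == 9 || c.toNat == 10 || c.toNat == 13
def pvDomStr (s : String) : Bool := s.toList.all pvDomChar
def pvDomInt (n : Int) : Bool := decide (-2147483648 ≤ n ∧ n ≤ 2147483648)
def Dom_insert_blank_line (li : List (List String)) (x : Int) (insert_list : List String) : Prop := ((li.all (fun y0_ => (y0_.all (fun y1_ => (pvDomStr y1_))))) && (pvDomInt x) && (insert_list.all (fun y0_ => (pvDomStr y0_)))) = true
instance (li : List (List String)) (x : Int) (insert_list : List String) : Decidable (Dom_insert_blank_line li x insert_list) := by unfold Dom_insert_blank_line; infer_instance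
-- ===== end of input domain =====

-- B replaces A's index-based adjacent-pair comparison loop by grouping equal-key
-- consecutive rows and joining the groups with insert_list (objective: alternative).

-- ===== PORT A =====
def insert_blank_line (li : List (List String)) (x : Int) (insert_list : List String) : List (List String) :=
  let n_li : List (List String) :=
    (PySem.List.pyRange 1 (li.length : Int) 1).foldl
      (fun n_li i =>
        let n_li := n_li ++ [PySem.List.pyGetD li (i - 1) []]
        if PySem.List.pyGetD (PySem.List.pyGetD li i []) x "" ≠
           PySem.List.pyGetD (PySem.List.pyGetD li (i - 1) []) x ""
        then n_li ++ [insert_list] else n_li)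
      []
  n_li ++ [PySem.List.pyGetD li (-1) []]

-- ===== PORT B =====
-- B's first loop body: append row to the last group if its key cell equals the
-- last grouped row's key cell (groups[-1][-1][x] == row[x]), else open a new group.
def pvAddRow (x : Int) (groups : List (List (List String))) (row : List String) : List (List (List String)) :=
  if groups ≠ [] ∧
     PySem.List.pyGetD (PySem.List.pyGetD (PySem.List.pyGetD groups (-1) []) (-1) []) x "" =
       PySem.List.pyGetD row x ""
  then groups.dropLast ++ [PySem.List.pyGetD groups (-1) [] ++ [row]]
  else groups ++ [[row]]

def insert_blank_line_alt (li : List (List String)) (x : Int) (insert_list : List String) : List (List String) :=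
  let groups := li.foldl (pvAddRow x) []
  groups.foldl (fun out g => (if out ≠ [] then out ++ [insert_list] else out) ++ g) []

-- ===== PRECONDITION & SPEC =====
-- Pre_ excludes exactly the inputs on which Python A raises IndexError: empty li
-- (A evaluates li[-1]) and, when li has at least two rows, a key position x that is
-- out of range for some row (A evaluates row[x] for every row in that case).
def Pre_insert_blank_line (li : List (List String)) (x : Int) (insert_list : List String) : Prop :=
  li ≠ [] ∧ (2 ≤ li.length → ∀ row ∈ li, PySem.Raise.InRange row.length x)
instance (li : List (List String)) (x : Int) (insert_list : List String) : Decidable (Pre_insert_blank_line li x insert_list) := by unfold Pre_insert_blank_line; infer_instance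

def pvWitness_insert_blank_line : List (List String) × Int × List String :=
  ([["a", "1"], ["a", "2"], ["b", "3"]], 0, ["", ""])

def Spec_insert_blank_line (li : List (List String)) (x : Int) (insert_list : List String) (out : List (List String)) : Prop := out = insert_blank_line_alt li x insert_list
instance (li : List (List String)) (x : Int) (insert_list : List String) (out : List (List String)) : Decidable (Spec_insert_blank_line li x insert_list out) := by unfold Spec_insert_blank_line; infer_instance

-- ===== CLAIM (what is proved, stated in full; the proofs are below) =====
def Claim_equal_insert_blank_line : Prop := ∀ (li : List (List String)) (x : Int) (insert_list : List String), Dom_insert_blank_line li x insert_list → Pre_insert_blank_line li x insert_list → Spec_insert_blank_line li x insert_list (insert_blank_line li x insert_list)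


-- ===== LEMMAS AND PROOFS =====

-- the key cell of a row, row[x]
def pvKey (x : Int) (r : List String) : String := PySem.List.pyGetD r x ""

-- adjacent grouping of a list by equal key cells
def pvGrpAll (x : Int) : List (List String) → List (List (List String))
  | [] => []
  | r :: rest =>
      (r :: rest.takeWhile (fun t => pvKey x t == pvKey x r)) ::
        pvGrpAll x (rest.dropWhile (fun t => pvKey x t == pvKey x r))
termination_by l => l.length
decreasing_by simpa using Nat.lt_succ_of_le (List.length_dropWhile_le _ _)

-- invariant of B's grouping fold
theorem pv_fold_grp (x : Int) : ∀ (rest : List (List String)) (gs : List (List (List String)))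
    (cur : List (List String)) (h : cur ≠ []),
    rest.foldl (pvAddRow x) (gs ++ [cur]) =
      gs ++ (cur ++ rest.takeWhile (fun t => pvKey x t == pvKey x (cur.getLast h))) ::
        pvGrpAll x (rest.dropWhile (fun t => pvKey x t == pvKey x (cur.getLast h))) := by
  intro rest
  induction rest with
  | nil => intro gs cur h; simp [pvGrpAll]
  | cons s rest ih =>
    intro gs cur h
    simp only [List.foldl_cons]
    by_cases hk : pvKey x (cur.getLast h) = pvKey x s
    · have hstep : pvAddRow x (gs ++ [cur]) s = gs ++ [cur ++ [s]] := by
        simp [pvAddRow, PySem.List.pyGetD_neg_one_append_singleton,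
          PySem.List.pyGetD_neg_one cur [] h, pvKey] at *
        simp [hk]
      rw [hstep, ih gs (cur ++ [s]) (by simp)]
      have hlast : (cur ++ [s]).getLast (by simp) = s := by simp
      have hpred : (fun t => pvKey x t == pvKey x ((cur ++ [s]).getLast (by simp)))
          = (fun t => pvKey x t == pvKey x (cur.getLast h)) := by
        funext t; rw [hlast, hk]
      rw [hpred]
      simp [hk.symm]
    · have hstep : pvAddRow x (gs ++ [cur]) s = (gs ++ [cur]) ++ [[s]] := by
        simp [pvAddRow, PySem.List.pyGetD_neg_one_append_singleton,
          PySem.List.pyGetD_neg_one cur [] h, pvKey] at *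
        intro hc; exact absurd hc hk
      rw [hstep, ih (gs ++ [cur]) [s] (by simp)]
      have hk' : ¬ (pvKey x s == pvKey x (cur.getLast h)) = true := by
        simp; exact fun e => hk e.symm
      simp [hk', pvGrpAll]

-- the whole grouping fold is pvGrpAll
theorem pv_groups_eq (x : Int) (r : List String) (rest : List (List String)) :
    (r :: rest).foldl (pvAddRow x) [] = pvGrpAll x (r :: rest) := by
  have h0 : pvAddRow x [] r = [] ++ [[r]] := by simp [pvAddRow]
  simp only [List.foldl_cons, h0]
  rw [pv_fold_grp x rest [] [r] (by simp)]
  simp [pvGrpAll]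

-- every group produced by pvGrpAll is nonempty
theorem pv_grp_ne (x : Int) : ∀ (l : List (List String)), ∀ g ∈ pvGrpAll x l, g ≠ [] := by
  intro l
  induction l using pvGrpAll.induct x with
  | case1 => simp [pvGrpAll]
  | case2 r rest ih =>
    simp only [pvGrpAll, List.mem_cons]
    rintro g (rfl | hg)
    · simp
    · exact ih g hg

-- B's join fold with a nonempty accumulator
theorem pv_join_fold (il : List String) : ∀ (gs : List (List (List String)))
    (out : List (List String)), out ≠ [] → (∀ g ∈ gs, g ≠ []) →
    gs.foldl (fun out g => (if out ≠ [] then out ++ [il] else out) ++ g) out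
      = out ++ gs.flatMap (fun g => il :: g) := by
  intro gs
  induction gs with
  | nil => simp
  | cons g gs ih =>
    intro out hout hne
    simp only [List.foldl_cons, if_pos hout]
    rw [ih (out ++ [il] ++ g) (by simp) (fun g hg => hne g (List.mem_cons_of_mem _ hg))]
    simp

-- B on a nonempty list, in closed form
theorem pv_alt_eq (x : Int) (il : List String) (r : List String) (rest : List (List String)) :
    (pvGrpAll x (r :: rest)).foldl (fun out g => (if out ≠ [] then out ++ [il] else out) ++ g) []
      = (r :: rest.takeWhile (fun t => pvKey x t == pvKey x r))
        ++ (pvGrpAll x (rest.dropWhile (fun t => pvKey x t == pvKey x r))).flatMap (fun g => il :: g) := by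
  rw [show pvGrpAll x (r :: rest) = (r :: rest.takeWhile (fun t => pvKey x t == pvKey x r)) ::
        pvGrpAll x (rest.dropWhile (fun t => pvKey x t == pvKey x r)) from by simp [pvGrpAll]]
  simp only [List.foldl_cons, ne_eq, not_true_eq_false, List.nil_append]
  rw [pv_join_fold il _ _ (by simp) (pv_grp_ne x _)]
  simp

-- adjacent-pair spec of A's loop
def pvAspec (x : Int) (il : List String) : List (List String) → List (List String)
  | [] => []
  | [r] => [r]
  | r :: s :: rest =>
      r :: ((if pvKey x s ≠ pvKey x r then [il] else []) ++ pvAspec x il (s :: rest))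

-- pvAspec in group form
theorem pv_aspec_grp (x : Int) (il : List String) : ∀ (rest : List (List String)) (r : List String),
    pvAspec x il (r :: rest) =
      (r :: rest.takeWhile (fun t => pvKey x t == pvKey x r))
        ++ (pvGrpAll x (rest.dropWhile (fun t => pvKey x t == pvKey x r))).flatMap (fun g => il :: g) := by
  intro rest
  induction rest with
  | nil => intro r; simp [pvAspec, pvGrpAll]
  | cons s rest ih =>
    intro r
    by_cases hk : pvKey x s = pvKey x r
    · simp only [pvAspec, if_neg (not_not_intro hk), List.nil_append]
      rw [ih s]
      have hpred : (fun t => pvKey x t == pvKey x s) = (fun t => pvKey x t == pvKey x r) := by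
        funext t; rw [hk]
      rw [hpred]
      simp [hk]
    · simp only [pvAspec, if_pos hk]
      rw [ih s]
      have hk' : ¬ (pvKey x s == pvKey x r) = true := by simpa using hk
      simp [hk', pvGrpAll]

-- what one iteration of A's loop appends, as a function of the index
def pvF (x : Int) (il : List String) (li : List (List String)) (i : Int) : List (List String) :=
  [PySem.List.pyGetD li (i - 1) []] ++
    (if PySem.List.pyGetD (PySem.List.pyGetD li i []) x "" ≠
        PySem.List.pyGetD (PySem.List.pyGetD li (i - 1) []) x "" then [il] else [])

theorem pv_getD_cons {α : Type} (r : α) (t : List α) (i : Int) (d : α) (h : 1 ≤ i) :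
    PySem.List.pyGetD (r :: t) i d = PySem.List.pyGetD t (i - 1) d := by
  rw [PySem.List.pyGetD_of_nonneg _ d (by omega), PySem.List.pyGetD_of_nonneg _ d (by omega)]
  have : i.toNat = (i - 1).toNat + 1 := by omega
  rw [this]
  rfl

theorem pv_shift (x : Int) (il : List String) (r0 : List String) (t : List (List String)) (m : Nat) :
    (List.range m).flatMap (fun k : Nat => pvF x il (r0 :: t) (2 + (k : Int))) =
      (List.range m).flatMap (fun k : Nat => pvF x il t (1 + (k : Int))) := by
  have h : (fun k : Nat => pvF x il (r0 :: t) (2 + (k : Int))) = (fun k : Nat => pvF x il t (1 + (k : Int))) := by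
    funext k
    have h1 : PySem.List.pyGetD (r0 :: t) (2 + (k : Int)) [] = PySem.List.pyGetD t (1 + (k : Int)) [] := by
      rw [pv_getD_cons _ _ _ _ (by omega)]; congr 1; ring
    have h2 : PySem.List.pyGetD (r0 :: t) (2 + (k : Int) - 1) [] = PySem.List.pyGetD t (1 + (k : Int) - 1) [] := by
      rw [pv_getD_cons _ _ _ _ (by omega)]; congr 1; ring
    simp only [pvF, h1, h2]
  rw [h]

-- A's loop output in pvAspec form
theorem pv_a_flat (x : Int) (il : List String) : ∀ (rest : List (List String)) (r0 : List String),
    (PySem.List.pyRange 1 (((r0 :: rest).length : Nat) : Int) 1).flatMap (pvF x il (r0 :: rest))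
        ++ [(r0 :: rest).getLast (by simp)] = pvAspec x il (r0 :: rest) := by
  intro rest
  induction rest with
  | nil =>
    intro r0
    simp [PySem.List.pyRange_one_eq_nil, pvAspec]
  | cons r1 rest ih =>
    intro r0
    have hn : ((((r0 :: r1 :: rest).length : Nat)) : Int) = (rest.length : Int) + 2 := by
      simp; omega
    rw [hn, PySem.List.pyRange_one_cons (by omega)]
    simp only [List.flatMap_cons]
    have hrange : PySem.List.pyRange (1 + 1) ((rest.length : Int) + 2) 1
        = (List.range rest.length).map (fun k : Nat => 2 + (k : Int)) := by
      rw [PySem.List.pyRange_one]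
      norm_num
    rw [hrange, List.flatMap_map]
    rw [pv_shift]
    have hback : (List.range rest.length).flatMap (fun k : Nat => pvF x il (r1 :: rest) (1 + (k : Int)))
        = (PySem.List.pyRange 1 (((r1 :: rest).length : Nat) : Int) 1).flatMap (pvF x il (r1 :: rest)) := by
      rw [PySem.List.pyRange_one, List.flatMap_map]
      have hl : ((((r1 :: rest).length : Nat) : Int) - 1).toNat = rest.length := by simp
      rw [hl]
    rw [hback]
    have hLast : (r0 :: r1 :: rest).getLast (by simp) = (r1 :: rest).getLast (by simp) := by
      simp [List.getLast_cons]
    rw [hLast, List.append_assoc, ih r1]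
    have hF1 : pvF x il (r0 :: r1 :: rest) 1
        = [r0] ++ (if pvKey x r1 ≠ pvKey x r0 then [il] else []) := by
      simp [pvF, pvKey, PySem.List.pyGetD_zero_cons]
      rw [pv_getD_cons _ _ _ _ (by omega)]
      norm_num
    rw [hF1]
    simp [pvAspec]

-- A = B on every nonempty list
theorem pv_final (li : List (List String)) (x : Int) (il : List String) (h : li ≠ []) :
    insert_blank_line li x il = insert_blank_line_alt li x il := by
  obtain ⟨r, rest, rfl⟩ := List.exists_cons_of_ne_nil h
  unfold insert_blank_line insert_blank_line_alt
  simp only []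
  rw [pv_groups_eq, pv_alt_eq]
  have hfun : (fun (n_li : List (List String)) (i : Int) =>
      let n_li := n_li ++ [PySem.List.pyGetD (r :: rest) (i - 1) []]
      if PySem.List.pyGetD (PySem.List.pyGetD (r :: rest) i []) x "" ≠
         PySem.List.pyGetD (PySem.List.pyGetD (r :: rest) (i - 1) []) x ""
      then n_li ++ [il] else n_li)
      = fun acc i => acc ++ pvF x il (r :: rest) i := by
    funext acc i
    by_cases hc : PySem.List.pyGetD (PySem.List.pyGetD (r :: rest) i []) x "" ≠
        PySem.List.pyGetD (PySem.List.pyGetD (r :: rest) (i - 1) []) x ""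
    · simp [pvF, hc]
    · simp [pvF, hc]
  rw [hfun, PySem.List.foldl_append_eq_flatMap, List.nil_append,
    PySem.List.pyGetD_neg_one _ _ (by simp : r :: rest ≠ [])]
  rw [pv_a_flat x il rest r, pv_aspec_grp]

-- ===== VERDICT (by name: the statement is the Claim_ definition above) =====
theorem insert_blank_line_spec : Claim_equal_insert_blank_line := by
  intro li x il _ hpre
  unfold Spec_insert_blank_line
  exact pv_final li x il hpre.1
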